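-- pv_equiv track=rewrite | github.com/benrosenberg/benrosenberg.github.io | posts/int_sequences_and_knight_moves/integer_sequences_and_knight_walks.py | first_n_palindromes
-- ===== SOURCE A (Python) =====
-- def first_n_palindromes(n):
--     out = []
--     i = 1
--     while len(out) < n:
--         if str(i) == str(i)[::-1]:
--             out.append(i)
--         i += 1
--     return out
-- ===== SOURCE B (Python) =====
-- # B: construct the palindromes directly, by mirroring the digits of increasing
-- # half-values length by length, instead of testing every integer.
-- def _mirror(h, odd):
--     p = h
--     t = h // 10 if odd else h
--     while t:
--         p = p * 10 + t % 10
--         t //= 10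
--     return p
--
--
-- def first_n_palindromes(n):
--     out = []
--     L = 1
--     while len(out) < n:
--         h0 = 10 ** ((L - 1) // 2)
--         out += [_mirror(h, L % 2) for h in range(h0, 10 * h0)][:n - len(out)]
--         L += 1
--     return out
-- ===== Notes on version B (the rewrite author's own statement) =====
-- stated objective: faster
-- what changed: Instead of scanning every integer and testing whether its decimal string is a palindrome, B constructs the palindromes directly in increasing order by mirroring the digits of increasing half-values, length by length.
import Mathlib
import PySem

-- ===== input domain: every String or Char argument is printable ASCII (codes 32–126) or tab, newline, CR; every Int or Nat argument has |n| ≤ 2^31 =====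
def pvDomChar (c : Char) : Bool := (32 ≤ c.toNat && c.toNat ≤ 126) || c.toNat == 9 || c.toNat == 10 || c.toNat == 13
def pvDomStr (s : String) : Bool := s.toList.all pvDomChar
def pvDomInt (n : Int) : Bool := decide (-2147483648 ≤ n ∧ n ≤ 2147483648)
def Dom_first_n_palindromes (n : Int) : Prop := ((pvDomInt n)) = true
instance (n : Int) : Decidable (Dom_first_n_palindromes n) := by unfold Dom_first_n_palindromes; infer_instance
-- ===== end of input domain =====

-- B replaces A's scan of every integer by direct construction of the palindromes
-- (mirroring the digits of increasing half-values, length by length).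

-- ===== PORT A =====
-- str(i)[::-1]: the slice always succeeds (step -1 ≠ 0), so the `none` branch is unreachable
def pvRevA (s : String) : String :=
  match PySem.Str.slice? s none none (-1) with
  | some r => r
  | none => s

-- the while loop; fuel bounds the number of iterations (i, i+1, …), chosen in
-- first_n_palindromes large enough that the loop always fills `out` first (proved below)
def loopA (n : Int) : Nat → Int → List Int → List Int
  | 0, _, out => out
  | fuel + 1, i, out =>
    if (out.length : Int) < n then
      loopA n fuel (i + 1)
        (if PySem.Int.toStr i == pvRevA (PySem.Int.toStr i) then out ++ [i] else out)
    else out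

def first_n_palindromes (n : Int) : List Int :=
  loopA n (10 ^ n.toNat - 1) 1 []

-- ===== PORT B =====
-- the `while t:` loop of _mirror; it is only ever called with t ≥ 0 (so Python's
-- `t != 0` test is 0 < t there); terminates because t strictly decreases
def mirrorLoop (p t : Int) : Int :=
  if h : 0 < t then mirrorLoop (p * 10 + PySem.Int.mod t 10) (PySem.Int.floordiv t 10)
  else p
termination_by t.toNat
decreasing_by
  have h1 : PySem.Int.floordiv t 10 = t / 10 := Int.fdiv_eq_ediv_of_nonneg t (by omega)
  omega

def mirrorB (h odd : Int) : Int :=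
  mirrorLoop h (if odd ≠ 0 then PySem.Int.floordiv h 10 else h)

-- 10 ** ((L-1)//2): the exponent (L-1)//2 is ≥ 0 for every L the loop reaches (L ≥ 1),
-- where .toNat is exact
def loopB (n : Int) (out : List Int) (L : Int) : List Int :=
  if _h : (out.length : Int) < n then
    loopB n
      (out ++ PySem.List.slice
        ((PySem.List.pyRange (10 ^ (PySem.Int.floordiv (L - 1) 2).toNat)
            (10 * 10 ^ (PySem.Int.floordiv (L - 1) 2).toNat) 1).map
          (fun x => mirrorB x (PySem.Int.mod L 2)))
        none (some (n - out.length)))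
      (L + 1)
  else out
termination_by (n - out.length).toNat
decreasing_by
  have hpos : (0:Int) ≤ n - out.length := by omega
  rw [PySem.List.slice_to _ hpos]
  have h10 : (1:Int) ≤ 10 ^ (PySem.Int.floordiv (L - 1) 2).toNat := one_le_pow₀ (by omega)
  have hlen : ((PySem.List.pyRange (10 ^ (PySem.Int.floordiv (L - 1) 2).toNat)
      (10 * 10 ^ (PySem.Int.floordiv (L - 1) 2).toNat) 1).map
      (fun x => mirrorB x (PySem.Int.mod L 2))).length ≥ 1 := by
    rw [List.length_map, PySem.List.length_pyRange_one]; omega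
  have htake : (List.take (n - ↑out.length).toNat
      ((PySem.List.pyRange (10 ^ (PySem.Int.floordiv (L - 1) 2).toNat)
        (10 * 10 ^ (PySem.Int.floordiv (L - 1) 2).toNat) 1).map
        (fun x => mirrorB x (PySem.Int.mod L 2)))).length ≥ 1 := by
    rw [List.length_take]; omega
  rw [List.length_append]
  omega

def first_n_palindromes_alt (n : Int) : List Int :=
  loopB n [] 1

-- ===== PRECONDITION & SPEC =====
def Spec_first_n_palindromes (n : Int) (out : List Int) : Prop := out = first_n_palindromes_alt n
instance (n : Int) (out : List Int) : Decidable (Spec_first_n_palindromes n out) := by unfold Spec_first_n_palindromes; infer_instance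

-- ===== CLAIM (what is proved, stated in full; the proofs are below) =====
def Claim_equal_first_n_palindromes : Prop := ∀ (n : Int), Dom_first_n_palindromes n → Spec_first_n_palindromes n (first_n_palindromes n)

-- ===== LEMMAS AND PROOFS =====

-- `palB i`: the decimal digits of i form a palindrome (the property A tests on strings)
def palB (i : Int) : Bool := Nat.digits 10 i.toNat == (Nat.digits 10 i.toNat).reverse

-- `halfOf odd h`: the part of the half-value h that _mirror appends reversed
def halfOf (odd : Bool) (h : Nat) : Nat := if odd then h / 10 else h

theorem halfOf_true (h : Nat) : halfOf true h = h / 10 := by simp [halfOf]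
theorem halfOf_false (h : Nat) : halfOf false h = h := by simp [halfOf]

-- the value _mirror(h, odd) computes, expressed through Nat.digits
def mir (odd : Bool) (h : Nat) : Nat :=
  h * 10 ^ (Nat.digits 10 (halfOf odd h)).length
    + Nat.ofDigits 10 (Nat.digits 10 (halfOf odd h)).reverse

-- B's block of palindromes for length L ≥ 1, exactly as loopB builds it
def blockB (L : Int) : List Int :=
  (PySem.List.pyRange (10 ^ (PySem.Int.floordiv (L - 1) 2).toNat)
      (10 * 10 ^ (PySem.Int.floordiv (L - 1) 2).toNat) 1).map
    (fun x => mirrorB x (PySem.Int.mod L 2))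

-- A's block: the palindromes among the L-digit numbers
def blockA (L : Int) : List Int :=
  (PySem.List.pyRange (10 ^ (L - 1).toNat) (10 ^ L.toNat) 1).filter palB

-- B's blocks for lengths L, L+1, …, L+M-1
def cat : Int → Nat → List Int
  | _, 0 => []
  | L, M + 1 => blockB L ++ cat (L + 1) M

-- ---- generic: strictly increasing lists with the same members are equal
theorem eq_of_pairwise_lt_of_mem_iff {l1 l2 : List Int}
    (h1 : l1.Pairwise (· < ·)) (h2 : l2.Pairwise (· < ·))
    (hm : ∀ x, x ∈ l1 ↔ x ∈ l2) : l1 = l2 := by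
  induction l1 generalizing l2 with
  | nil =>
    cases l2 with
    | nil => rfl
    | cons b t2 => exact absurd ((hm b).mpr (by simp)) (by simp)
  | cons a t1 ih =>
    cases l2 with
    | nil => exact absurd ((hm a).mp (by simp)) (by simp)
    | cons b t2 =>
      have hab : a = b := by
        have ha : a = b ∨ a ∈ t2 := by simpa using (hm a).mp (by simp)
        have hb : b = a ∨ b ∈ t1 := by simpa using (hm b).mpr (by simp)
        rcases ha with h | h
        · exact h
        · rcases hb with h' | h'
          · exact h'.symm
          · have := (List.pairwise_cons.mp h1).1 b h'
            have := (List.pairwise_cons.mp h2).1 a h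
            omega
      subst hab
      have ht : ∀ x, x ∈ t1 ↔ x ∈ t2 := by
        intro x
        constructor
        · intro hx
          have hne : x ≠ a := by have := (List.pairwise_cons.mp h1).1 x hx; omega
          have := (hm x).mp (List.mem_cons_of_mem _ hx)
          rcases List.mem_cons.mp this with h | h
          · exact absurd h hne
          · exact h
        · intro hx
          have hne : x ≠ a := by have := (List.pairwise_cons.mp h2).1 x hx; omega
          have := (hm x).mpr (List.mem_cons_of_mem _ hx)
          rcases List.mem_cons.mp this with h | h
          · exact absurd h hne
          · exact h
      rw [ih (List.pairwise_cons.mp h1).2 (List.pairwise_cons.mp h2).2 ht]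

-- ---- digit-length toolbox
theorem len_digits_ge (m : Nat) (hm : m ≠ 0) :
    10 ^ ((Nat.digits 10 m).length - 1) ≤ m := by
  have h := Nat.base_pow_length_digits_le 10 m (by norm_num) hm
  have hlen : 1 ≤ (Nat.digits 10 m).length := by
    have hne : Nat.digits 10 m ≠ [] := Nat.digits_ne_nil_iff_ne_zero.mpr hm
    cases h' : Nat.digits 10 m with
    | nil => exact absurd h' hne
    | cons x t => simp
  have : 10 ^ (Nat.digits 10 m).length = 10 * 10 ^ ((Nat.digits 10 m).length - 1) := by
    rw [← pow_succ']
    congr 1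
    omega
  omega

theorem len_digits_eq (m L : Nat) (hL : 1 ≤ L) (h1 : 10 ^ (L - 1) ≤ m) (h2 : m < 10 ^ L) :
    (Nat.digits 10 m).length = L := by
  have hm : m ≠ 0 := by have : 1 ≤ 10 ^ (L-1) := Nat.one_le_pow _ _ (by norm_num); omega
  have ha := len_digits_ge m hm
  have hb := Nat.lt_base_pow_length_digits (b := 10) (m := m) (by norm_num)
  by_contra hne
  rcases Nat.lt_or_ge (Nat.digits 10 m).length L with h | h
  · have : 10 ^ (Nat.digits 10 m).length ≤ 10 ^ (L - 1) :=
      Nat.pow_le_pow_right (by norm_num) (by omega)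
    omega
  · have : 10 ^ L ≤ 10 ^ ((Nat.digits 10 m).length - 1) :=
      Nat.pow_le_pow_right (by norm_num) (by omega)
    omega

-- ---- A's string test is the digit-palindrome test
theorem toDigitsCore_eq (fuel : Nat) : ∀ (n : Nat) (ds : List Char), n < fuel → n ≠ 0 →
    Nat.toDigitsCore 10 fuel n ds = ((Nat.digits 10 n).map Nat.digitChar).reverse ++ ds := by
  induction fuel with
  | zero => intro n ds h _; omega
  | succ f ih =>
    intro n ds h hn
    rw [Nat.toDigitsCore.eq_def]
    by_cases h0 : n / 10 = 0
    · have hlt : n < 10 := by omega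
      have hm : n % 10 = n := Nat.mod_eq_of_lt hlt
      rw [Nat.digits_def' (b := 10) (by norm_num) (by omega), h0]
      simp [h0, hm]
    · rw [Nat.digits_def' (b := 10) (by norm_num) (by omega)]
      simp only [h0, if_false]
      rw [ih (n / 10) _ (by omega) h0]
      simp

theorem toDigits_eq (n : Nat) (hn : n ≠ 0) :
    Nat.toDigits 10 n = ((Nat.digits 10 n).map Nat.digitChar).reverse := by
  rw [Nat.toDigits, toDigitsCore_eq (n + 1) n [] (by omega) hn, List.append_nil]

theorem testA_eq (i : Int) (hi : 1 ≤ i) :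
    (PySem.Int.toStr i == pvRevA (PySem.Int.toStr i)) = palB i := by
  have hrev : pvRevA (PySem.Int.toStr i) = String.ofList (PySem.Int.toStr i).toList.reverse := by
    rw [pvRevA, PySem.Str.slice?_none_none_neg_one]
  have hnn : i.toNat ≠ 0 := by omega
  have hdig : (PySem.Int.toStr i).toList = ((Nat.digits 10 i.toNat).map Nat.digitChar).reverse := by
    rw [PySem.Int.toList_toStr, PySem.Int.toChars, if_neg (by omega), toDigits_eq _ hnn]
  set d := Nat.digits 10 i.toNat with hd
  rw [Bool.eq_iff_iff]
  simp only [palB, beq_iff_eq, hrev]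
  constructor
  · intro hs
    have h1 : (PySem.Int.toStr i).toList = (PySem.Int.toStr i).toList.reverse := by
      conv_lhs => rw [hs]
      rw [String.toList_ofList]
    rw [hdig, List.reverse_reverse] at h1
    have h2 : d.map Nat.digitChar = (d.map Nat.digitChar).reverse := h1.symm
    have hinv : ∀ a ∈ d, (fun c => c.toNat - 48) (Nat.digitChar a) = a := by
      intro a ha
      have : a < 10 := Nat.digits_lt_base (by norm_num) ha
      interval_cases a <;> simp [Nat.digitChar]
    have h3 := congrArg (List.map (fun c => c.toNat - 48)) h2
    rw [← List.map_reverse, List.map_map, List.map_map] at h3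
    have e1 : List.map ((fun c => c.toNat - 48) ∘ Nat.digitChar) d = d := by
      simpa using List.map_congr_left hinv
    have e2 : List.map ((fun c => c.toNat - 48) ∘ Nat.digitChar) d.reverse = d.reverse := by
      simpa using List.map_congr_left (fun a ha => hinv a (by simpa using ha))
    rw [e1, e2] at h3
    exact h3
  · intro hp
    conv_lhs => rw [← String.ofList_toList (s := PySem.Int.toStr i)]
    congr 1
    rw [hdig, List.reverse_reverse, ← List.map_reverse, ← hp]

-- ---- the _mirror loop computes `mir`
theorem mirrorLoop_eq (t : Nat) : ∀ (p : Nat),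
    mirrorLoop (p : Int) (t : Int)
      = ((p * 10 ^ (Nat.digits 10 t).length + Nat.ofDigits 10 (Nat.digits 10 t).reverse : Nat) : Int) := by
  induction t using Nat.strong_induction_on with
  | _ t ih =>
    intro p
    rw [mirrorLoop]
    by_cases h0 : 0 < t
    · rw [dif_pos (by exact_mod_cast h0)]
      have hmod : PySem.Int.mod (t : Int) 10 = ((t % 10 : Nat) : Int) := by
        rw [PySem.Int.mod, Int.fmod_eq_emod]
        push_cast
        simp
      have hdiv : PySem.Int.floordiv (t : Int) 10 = ((t / 10 : Nat) : Int) := by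
        rw [PySem.Int.floordiv, Int.fdiv_eq_ediv_of_nonneg _ (by omega)]
        omega
      rw [hmod, hdiv, show ((p : Int) * 10 + ((t % 10 : Nat) : Int)) = ((p * 10 + t % 10 : Nat) : Int) by push_cast; ring,
        ih (t / 10) (by omega) (p * 10 + t % 10)]
      rw [Nat.digits_def' (b := 10) (by norm_num) h0]
      push_cast [Nat.ofDigits_append, Nat.ofDigits_singleton, List.reverse_cons,
        List.length_cons, List.length_reverse]
      ring
    · have ht : t = 0 := by omega
      subst ht
      rw [dif_neg (by omega)]
      simp [Nat.ofDigits_nil]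

theorem mirrorB_eq (x : Int) (hx : 1 ≤ x) (o : Int) :
    mirrorB x o = ((mir (decide (o ≠ 0)) x.toNat : Nat) : Int) := by
  lift x to Nat using (by omega : (0:Int) ≤ x) with m
  rw [mirrorB, mir, Int.toNat_natCast]
  by_cases hodd : o ≠ 0
  · rw [if_pos hodd, show (decide (o ≠ 0)) = true by simp [hodd]]
    have hdiv : PySem.Int.floordiv (m : Int) 10 = ((m / 10 : Nat) : Int) := by
      rw [PySem.Int.floordiv, Int.fdiv_eq_ediv_of_nonneg _ (by omega)]
      omega
    rw [hdiv, mirrorLoop_eq (m / 10) m]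
    simp [halfOf]
  · rw [if_neg hodd, show (decide (o ≠ 0)) = false by simp; omega]
    rw [mirrorLoop_eq m m]
    simp [halfOf]

-- ---- digits of a mirrored half
theorem mir_digits (odd : Bool) (h : Nat) (h1 : 1 ≤ h) :
    Nat.digits 10 (mir odd h) = (Nat.digits 10 (halfOf odd h)).reverse ++ Nat.digits 10 h := by
  have hval : Nat.ofDigits 10 ((Nat.digits 10 (halfOf odd h)).reverse ++ Nat.digits 10 h) = mir odd h := by
    rw [Nat.ofDigits_append, Nat.ofDigits_digits, List.length_reverse, mir]
    ring
  rw [← hval]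
  apply Nat.digits_ofDigits 10 (by norm_num)
  · intro d hd
    rcases List.mem_append.mp hd with hd | hd
    · exact Nat.digits_lt_base (by norm_num) (List.mem_reverse.mp hd)
    · exact Nat.digits_lt_base (by norm_num) hd
  · intro hne
    have hdh : Nat.digits 10 h ≠ [] := Nat.digits_ne_nil_iff_ne_zero.mpr (by omega)
    rw [List.getLast_append hne]
    simp only [List.isEmpty_iff]
    rw [dif_neg hdh]
    exact Nat.getLast_digit_ne_zero 10 (by omega)

theorem mir_pal (odd : Bool) (h : Nat) (h1 : 1 ≤ h) :
    Nat.digits 10 (mir odd h) = (Nat.digits 10 (mir odd h)).reverse := by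
  rw [mir_digits odd h h1]
  cases odd with
  | false =>
    rw [halfOf_false, List.reverse_append, List.reverse_reverse]
  | true =>
    rw [halfOf_true]
    have hstep : Nat.digits 10 h = h % 10 :: Nat.digits 10 (h / 10) :=
      Nat.digits_def' (by norm_num) (by omega)
    rw [List.reverse_append, List.reverse_reverse, hstep, List.reverse_cons, List.append_assoc]
    simp

theorem halfOf_len (odd : Bool) (h H : Nat) (hH : 1 ≤ H)
    (hlo : 10 ^ (H - 1) ≤ h) (hhi : h < 10 ^ H) :
    (Nat.digits 10 (halfOf odd h)).length = H - (if odd then 1 else 0) := by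
  have h1 : 1 ≤ h := le_trans (Nat.one_le_pow _ _ (by norm_num)) hlo
  have hlen : (Nat.digits 10 h).length = H := len_digits_eq h H hH hlo hhi
  cases odd with
  | false => rw [halfOf_false]; simpa using hlen
  | true =>
    have hstep : Nat.digits 10 h = h % 10 :: Nat.digits 10 (h / 10) :=
      Nat.digits_def' (by norm_num) (show 0 < h by omega)
    have hlen2 : (Nat.digits 10 h).length = (Nat.digits 10 (h / 10)).length + 1 := by
      rw [hstep]; simp
    rw [halfOf_true]
    simp only [if_pos]
    omega

theorem mir_complete (m : Nat) (hm : 1 ≤ m)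
    (hp : Nat.digits 10 m = (Nat.digits 10 m).reverse) :
    m = mir (decide ((Nat.digits 10 m).length % 2 = 1))
          (m / 10 ^ ((Nat.digits 10 m).length / 2))
      ∧ (Nat.digits 10 (m / 10 ^ ((Nat.digits 10 m).length / 2))).length
          = (Nat.digits 10 m).length - (Nat.digits 10 m).length / 2 := by
  set d := Nat.digits 10 m with hd
  set L := d.length with hL
  set k := L / 2 with hk
  have hLpos : 1 ≤ L := by
    have hne : d ≠ [] := by rw [hd]; exact Nat.digits_ne_nil_iff_ne_zero.mpr (by omega)
    have := List.length_pos_iff.mpr hne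
    omega
  have hkL : k < L := by omega
  have hofd : m / 10 ^ k = Nat.ofDigits 10 (d.drop k) := by
    rw [hd]; exact Nat.self_div_pow_eq_ofDigits_drop k m (by norm_num)
  set h := m / 10 ^ k with hh
  have hdropne : d.drop k ≠ [] := by
    intro hcon
    have := congrArg List.length hcon
    simp at this
    omega
  have hdigh : Nat.digits 10 h = d.drop k := by
    rw [hofd]
    apply Nat.digits_ofDigits 10 (by norm_num)
    · exact fun x hx => Nat.digits_lt_base (by norm_num) (List.mem_of_mem_drop hx)
    · intro hne
      have : (d.drop k).getLast hne = d.getLast (by rw [hd]; exact Nat.digits_ne_nil_iff_ne_zero.mpr (by omega)) := by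
        apply List.getLast_drop
      rw [this]
      exact Nat.getLast_digit_ne_zero 10 (by omega)
  have hlenh : (Nat.digits 10 h).length = L - k := by
    rw [hdigh, List.length_drop]
  refine ⟨?_, hlenh⟩
  have hhpos : 1 ≤ h := by
    have : Nat.digits 10 h ≠ [] := by rw [hdigh]; exact hdropne
    have := Nat.digits_ne_nil_iff_ne_zero.mp this
    omega
  have hhalf : Nat.digits 10 (halfOf (decide (L % 2 = 1)) h) = d.drop (L - k) := by
    by_cases hodd : L % 2 = 1
    · rw [show (decide (L % 2 = 1)) = true by simp [hodd], halfOf_true]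
      have hstep : Nat.digits 10 h = h % 10 :: Nat.digits 10 (h / 10) :=
        Nat.digits_def' (by norm_num) (show 0 < h by omega)
      have : Nat.digits 10 (h / 10) = (Nat.digits 10 h).tail := by rw [hstep]; rfl
      rw [this, hdigh, List.tail_drop]
      congr 1
      omega
    · rw [show (decide (L % 2 = 1)) = false by simp [hodd], halfOf_false, hdigh]
      congr 1
      omega
  have hlenhalf : (Nat.digits 10 (halfOf (decide (L % 2 = 1)) h)).length = k := by
    rw [hhalf, List.length_drop]
    omega
  rw [mir, hlenhalf, hhalf]
  have htake : d.take k = (d.drop (L - k)).reverse := by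
    conv_lhs => rw [hp]
    rw [List.take_reverse]
  have hsplit : m = Nat.ofDigits 10 (d.take k) + 10 ^ k * h := by
    have h1 : m = Nat.ofDigits 10 (d.take k ++ d.drop k) := by
      rw [List.take_append_drop, hd, Nat.ofDigits_digits]
    rw [h1, Nat.ofDigits_append, List.length_take,
      min_eq_left (show k ≤ d.length by omega), hofd]
  rw [hsplit, htake]
  ring

-- mir odd h = h·10^K + r with r < 10^K, where K = H - (1 if odd else 0)
theorem mir_decomp (odd : Bool) (h H : Nat) (hH : 1 ≤ H)
    (hlo : 10 ^ (H - 1) ≤ h) (hhi : h < 10 ^ H) :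
    ∃ r < 10 ^ (H - (if odd then 1 else 0)),
      mir odd h = h * 10 ^ (H - (if odd then 1 else 0)) + r := by
  have hK := halfOf_len odd h H hH hlo hhi
  refine ⟨Nat.ofDigits 10 (Nat.digits 10 (halfOf odd h)).reverse, ?_, ?_⟩
  · have := Nat.ofDigits_lt_base_pow_length (b := 10)
      (l := (Nat.digits 10 (halfOf odd h)).reverse) (by norm_num)
      (fun x hx => Nat.digits_lt_base (by norm_num) (List.mem_reverse.mp hx))
    rwa [List.length_reverse, hK] at this
  · rw [mir, hK]

theorem mir_len (odd : Bool) (h H : Nat) (hH : 1 ≤ H)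
    (hlo : 10 ^ (H - 1) ≤ h) (hhi : h < 10 ^ H) :
    (Nat.digits 10 (mir odd h)).length = (H - (if odd then 1 else 0)) + H := by
  have h1 : 1 ≤ h := le_trans (Nat.one_le_pow _ _ (by norm_num)) hlo
  rw [mir_digits odd h h1, List.length_append, List.length_reverse,
    halfOf_len odd h H hH hlo hhi, len_digits_eq h H hH hlo hhi]

-- ---- the block identity: A's L-digit palindromes are exactly B's mirrored halves
theorem block_eq (L : Int) (hL : 1 ≤ L) : blockA L = blockB L := by
  set Ln := L.toNat with hLndef
  have hLn : ((Ln : Nat) : Int) = L := by omega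
  have hLn1 : 1 ≤ Ln := by omega
  set H : Nat := (Ln + 1) / 2 with hH
  set k : Nat := Ln / 2 with hk
  have hH1 : 1 ≤ H := by omega
  have hkH : k + H = Ln := by omega
  have hfd : (PySem.Int.floordiv (L - 1) 2).toNat = H - 1 := by
    rw [PySem.Int.floordiv, Int.fdiv_eq_ediv_of_nonneg _ (by omega)]
    omega
  have hoddInt : PySem.Int.mod L 2 = ((Ln % 2 : Nat) : Int) := by
    rw [PySem.Int.mod, Int.fmod_eq_emod, if_pos (Or.inl (by norm_num))]
    omega
  have hflag : (decide ((((Ln % 2 : Nat) : Int)) ≠ 0)) = decide (Ln % 2 = 1) := by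
    rcases Nat.mod_two_eq_zero_or_one Ln with h | h <;> simp [h]
  set odd : Bool := decide (Ln % 2 = 1) with hodddef
  have hK : H - (if odd then 1 else 0) = k := by
    rcases Nat.mod_two_eq_zero_or_one Ln with h | h
    · rw [show odd = false by simp [hodddef, h]]
      simp
      omega
    · rw [show odd = true by simp [hodddef, h]]
      simp
      omega
  have hpH : (10:Nat) * 10 ^ (H - 1) = 10 ^ H := by
    rw [← pow_succ']
    congr 1
    omega
  have hLm1 : (L - 1).toNat = Ln - 1 := by omega
  -- every element of the half range maps through mirrorB to mir
  have hmb : ∀ a : Int, 1 ≤ a →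
      mirrorB a (PySem.Int.mod L 2) = ((mir odd a.toNat : Nat) : Int) := by
    intro a ha
    rw [hoddInt, mirrorB_eq a ha, hflag]
  -- the mir image of an in-range half has Ln digits and is bounded accordingly
  have hmirfacts : ∀ an : Nat, 10 ^ (H - 1) ≤ an → an < 10 ^ H →
      (Nat.digits 10 (mir odd an)).length = Ln ∧
      10 ^ (Ln - 1) ≤ mir odd an ∧ mir odd an < 10 ^ Ln := by
    intro an h1 h2
    have hlen : (Nat.digits 10 (mir odd an)).length = Ln := by
      rw [mir_len odd an H hH1 h1 h2, hK]
      omega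
    have hne : mir odd an ≠ 0 := by
      intro hc
      rw [hc] at hlen
      simp at hlen
      omega
    have hge := len_digits_ge (mir odd an) hne
    have hlt := Nat.lt_base_pow_length_digits (b := 10) (m := mir odd an) (by norm_num)
    rw [hlen] at hge hlt
    exact ⟨hlen, hge, hlt⟩
  unfold blockA blockB
  have hcast : ((10:Int) ^ (H - 1)) = (((10:Nat) ^ (H - 1) : Nat) : Int) := by push_cast; ring
  have hcast2 : (10:Int) * 10 ^ (H - 1) = (((10:Nat) ^ H : Nat) : Int) := by
    rw [← hpH]; push_cast; ring
  have hcast3 : ((10:Int) ^ (Ln - 1)) = (((10:Nat) ^ (Ln - 1) : Nat) : Int) := by push_cast; ring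
  have hcast4 : ((10:Int) ^ Ln) = (((10:Nat) ^ Ln : Nat) : Int) := by push_cast; ring
  rw [hfd, hLm1]
  apply eq_of_pairwise_lt_of_mem_iff
  · exact (PySem.List.pairwise_lt_pyRange_one _ _).filter _
  · rw [List.pairwise_map]
    apply List.Pairwise.imp_of_mem ?_ (PySem.List.pairwise_lt_pyRange_one _ _)
    intro a b hamem hbmem hab
    rw [PySem.List.mem_pyRange_one] at hamem hbmem
    have ha1 : 1 ≤ a := by
      have h1 : (1:Nat) ≤ 10 ^ (H-1) := Nat.one_le_pow _ _ (by norm_num)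
      rw [hcast] at hamem
      omega
    have hb1 : 1 ≤ b := by
      have h1 : (1:Nat) ≤ 10 ^ (H-1) := Nat.one_le_pow _ _ (by norm_num)
      rw [hcast] at hbmem
      omega
    rw [hmb a ha1, hmb b hb1]
    have haN : 10 ^ (H - 1) ≤ a.toNat ∧ a.toNat < 10 ^ H := by
      rw [hcast2, hcast] at hamem
      omega
    have hbN : 10 ^ (H - 1) ≤ b.toNat ∧ b.toNat < 10 ^ H := by
      rw [hcast2, hcast] at hbmem
      omega
    obtain ⟨ra, hra, hda⟩ := mir_decomp odd a.toNat H hH1 haN.1 haN.2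
    obtain ⟨rb, hrb, hdb⟩ := mir_decomp odd b.toNat H hH1 hbN.1 hbN.2
    rw [hK] at hra hda hrb hdb
    have hmono : mir odd a.toNat < mir odd b.toNat := by
      rw [hda, hdb]
      have hstep1 : a.toNat * 10 ^ k + ra < (a.toNat + 1) * 10 ^ k := by
        rw [Nat.add_mul, Nat.one_mul]
        omega
      have hstep2 : (a.toNat + 1) * 10 ^ k ≤ b.toNat * 10 ^ k :=
        Nat.mul_le_mul_right _ (by omega)
      omega
    exact_mod_cast hmono
  · intro x
    rw [List.mem_filter, List.mem_map]
    constructor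
    · rintro ⟨hxr, hpal⟩
      rw [PySem.List.mem_pyRange_one] at hxr
      have hx1 : 1 ≤ x := by
        have h1 : (1:Nat) ≤ 10 ^ (Ln-1) := Nat.one_le_pow _ _ (by norm_num)
        rw [hcast3] at hxr
        omega
      have hmN : 10 ^ (Ln - 1) ≤ x.toNat ∧ x.toNat < 10 ^ Ln := by
        rw [hcast3, hcast4] at hxr
        omega
      have hpal' : Nat.digits 10 x.toNat = (Nat.digits 10 x.toNat).reverse := by
        simpa [palB] using hpal
      have hlenm : (Nat.digits 10 x.toNat).length = Ln :=
        len_digits_eq x.toNat Ln hLn1 hmN.1 hmN.2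
      obtain ⟨hmir, hlenh⟩ := mir_complete x.toNat (by omega) hpal'
      rw [hlenm, ← hk, ← hodddef] at hmir
      rw [hlenm, ← hk] at hlenh
      have hlenh' : (Nat.digits 10 (x.toNat / 10 ^ k)).length = H := by omega
      have hh0 : x.toNat / 10 ^ k ≠ 0 := by
        intro hc
        rw [hc] at hlenh'
        simp at hlenh'
        omega
      have hhge := len_digits_ge _ hh0
      have hhlt := Nat.lt_base_pow_length_digits (b := 10) (m := x.toNat / 10 ^ k) (by norm_num)
      rw [hlenh'] at hhge hhlt
      refine ⟨((x.toNat / 10 ^ k : Nat) : Int), ?_, ?_⟩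
      · rw [PySem.List.mem_pyRange_one, hcast2, hcast]
        constructor <;> [exact_mod_cast hhge; exact_mod_cast hhlt]
      · rw [hmb _ (by exact_mod_cast Nat.one_le_iff_ne_zero.mpr hh0), Int.toNat_natCast, ← hmir]
        omega
    · rintro ⟨a, hamem, rfl⟩
      rw [PySem.List.mem_pyRange_one] at hamem
      have ha1 : 1 ≤ a := by
        have h1 : (1:Nat) ≤ 10 ^ (H-1) := Nat.one_le_pow _ _ (by norm_num)
        rw [hcast] at hamem
        omega
      have haN : 10 ^ (H - 1) ≤ a.toNat ∧ a.toNat < 10 ^ H := by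
        rw [hcast2, hcast] at hamem
        omega
      obtain ⟨hlen, hge, hlt⟩ := hmirfacts a.toNat haN.1 haN.2
      rw [hmb a ha1]
      constructor
      · rw [PySem.List.mem_pyRange_one, hcast3, hcast4]
        constructor <;> [exact_mod_cast hge; exact_mod_cast hlt]
      · simp only [palB, beq_iff_eq, Int.toNat_natCast]
        exact mir_pal odd a.toNat (by omega)

theorem blockB_ne_nil (L : Int) : 1 ≤ (blockB L).length := by
  have h10 : (1:Int) ≤ 10 ^ (PySem.Int.floordiv (L - 1) 2).toNat := one_le_pow₀ (by omega)
  unfold blockB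
  rw [List.length_map, PySem.List.length_pyRange_one]; omega

theorem cat_len (L : Int) (M : Nat) : M ≤ (cat L M).length := by
  induction M generalizing L with
  | zero => simp [cat]
  | succ M ih =>
    have := blockB_ne_nil L
    have := ih (L + 1)
    simp only [cat, List.length_append]; omega

theorem cat_snoc (M : Nat) : ∀ (L : Int), cat L (M + 1) = cat L M ++ blockB (L + M) := by
  induction M with
  | zero => intro L; simp [cat]
  | succ M ih =>
    intro L
    rw [show cat L (M + 1 + 1) = blockB L ++ cat (L + 1) (M + 1) from rfl, ih (L + 1),
      show cat L (M + 1) = blockB L ++ cat (L + 1) M from rfl, List.append_assoc,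
      show L + 1 + (M : Int) = L + (M + 1 : Nat) by push_cast; ring]

theorem filter_range_eq_cat (M : Nat) :
    (PySem.List.pyRange 1 ((10 : Int) ^ M) 1).filter palB = cat 1 M := by
  induction M with
  | zero =>
    rw [pow_zero, PySem.List.pyRange_one_eq_nil (by norm_num)]
    rfl
  | succ M ih =>
    have h1 : (1:Int) ≤ 10 ^ M := one_le_pow₀ (by norm_num)
    have h2 : (10:Int) ^ M ≤ 10 ^ (M + 1) := by
      rw [pow_succ]
      nlinarith
    rw [PySem.List.pyRange_one_append 1 ((10:Int) ^ M) (10 ^ (M + 1)) h1 h2,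
      List.filter_append, ih]
    have hA : (PySem.List.pyRange ((10:Int) ^ M) (10 ^ (M + 1)) 1).filter palB
        = blockA ((M + 1 : Nat) : Int) := by
      have e1 : ((((M + 1 : Nat) : Int)) - 1).toNat = M := by omega
      have e2 : (((M + 1 : Nat) : Int)).toNat = M + 1 := by omega
      rw [blockA, e1, e2]
    rw [hA, block_eq _ (by exact_mod_cast Nat.le_add_left 1 M), cat_snoc M 1]
    congr 2
    push_cast
    ring

-- ---- unrolling the two loops
theorem loopA_eq (n : Int) (fuel : Nat) : ∀ (i : Int) (out : List Int), 1 ≤ i →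
    (n - out.length).toNat ≤ ((PySem.List.pyRange i (i + fuel) 1).filter palB).length →
    loopA n fuel i out
      = out ++ ((PySem.List.pyRange i (i + fuel) 1).filter palB).take (n - out.length).toNat := by
  induction fuel with
  | zero =>
    intro i out _ hcount
    rw [show i + ((0:Nat):Int) = i by push_cast; ring] at hcount ⊢
    rw [PySem.List.pyRange_one_eq_nil (le_refl i)] at hcount ⊢
    simp only [List.filter_nil, List.length_nil, Nat.le_zero] at hcount
    rw [loopA, hcount]
    simp
  | succ fuel ih =>
    intro i out hi hcount
    have hsplit : i + ((fuel + 1 : Nat) : Int) = (i + 1) + ((fuel : Nat) : Int) := by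
      push_cast
      ring
    have hcons : PySem.List.pyRange i (i + ((fuel + 1 : Nat) : Int)) 1
        = i :: PySem.List.pyRange (i + 1) ((i + 1) + ((fuel : Nat) : Int)) 1 := by
      rw [PySem.List.pyRange_one_cons (by push_cast; omega), hsplit]
    rw [hcons] at hcount ⊢
    rw [loopA]
    by_cases hlt : (out.length : Int) < n
    · rw [if_pos hlt, testA_eq i hi]
      by_cases hp : palB i
      · rw [if_pos hp]
        rw [List.filter_cons_of_pos hp] at hcount ⊢
        rw [ih (i + 1) (out ++ [i]) (by omega) (by simp at hcount ⊢; omega)]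
        have hk : (n - ((out ++ [i]).length : Int)).toNat
            = (n - (out.length : Int)).toNat - 1 := by
          simp
          omega
        have hk2 : (n - (out.length : Int)).toNat
            = ((n - (out.length : Int)).toNat - 1) + 1 := by omega
        rw [hk, hk2, List.take_succ_cons, List.append_assoc]
        simp
      · rw [if_neg hp]
        rw [List.filter_cons_of_neg hp] at hcount ⊢
        rw [ih (i + 1) out (by omega) hcount]
    · rw [if_neg hlt]
      have : (n - (out.length : Int)).toNat = 0 := by omega
      rw [this]
      simp

theorem loopB_unfold (n : Int) (out : List Int) (L : Int) :
    loopB n out L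
      = if (out.length : Int) < n then
          loopB n (out ++ PySem.List.slice (blockB L) none (some (n - out.length))) (L + 1)
        else out := by
  rw [loopB]
  rfl

theorem loopB_eq (k : Nat) : ∀ (n : Int) (out : List Int) (L : Int) (M : Nat),
    (n - out.length).toNat = k → k ≤ M → 1 ≤ L →
    loopB n out L = out ++ (cat L M).take k := by
  induction k using Nat.strong_induction_on with
  | _ k ih =>
    intro n out L M hks hkM hL1
    rw [loopB_unfold]
    by_cases hlt : (out.length : Int) < n
    · rw [if_pos hlt]
      have hk1 : 1 ≤ k := by omega
      have hM1 : 1 ≤ M := by omega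
      rw [PySem.List.slice_to _ (by omega : (0:Int) ≤ n - out.length)]
      rw [show (n - (out.length : Int)).toNat = k from hks]
      set c := min k (blockB L).length with hc
      have hc1 : 1 ≤ c := by
        have := blockB_ne_nil L
        omega
      have hlen' : (out ++ (blockB L).take k).length = out.length + c := by
        rw [List.length_append, List.length_take]
      have hk' : (n - ((out ++ (blockB L).take k).length : Int)).toNat = k - c := by
        rw [hlen']
        omega
      rw [ih (k - c) (by omega) n _ (L + 1) (M - 1) hk' (by omega) (by omega)]
      have hcatM : cat L M = blockB L ++ cat (L + 1) (M - 1) := by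
        cases M with
        | zero => omega
        | succ M' => rfl
      rw [hcatM, List.take_append, List.append_assoc]
      have : k - (blockB L).length = k - c := by omega
      rw [this]
    · rw [if_neg hlt]
      have : k = 0 := by omega
      rw [this]
      simp

-- ===== VERDICT (by name: the statement is the Claim_ definition above) =====
theorem first_n_palindromes_spec : Claim_equal_first_n_palindromes := by
  intro n _
  unfold Spec_first_n_palindromes first_n_palindromes first_n_palindromes_alt
  set M := n.toNat with hM
  have hone : (1:Nat) ≤ 10 ^ M := Nat.one_le_pow _ _ (by norm_num)
  have hrange : (1 : Int) + ((10 ^ M - 1 : Nat) : Int) = (10:Int) ^ M := by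
    rw [Nat.cast_sub hone]
    push_cast
    ring
  have hcount : (n - (([] : List Int).length : Int)).toNat
      ≤ ((PySem.List.pyRange 1 (1 + ((10 ^ M - 1 : Nat) : Int)) 1).filter palB).length := by
    rw [hrange, filter_range_eq_cat M]
    have := cat_len 1 M
    simp
    omega
  rw [loopA_eq n (10 ^ M - 1) 1 [] (le_refl 1) hcount,
    loopB_eq M n [] 1 M (by simp; omega) (le_refl M) (le_refl 1)]
  rw [hrange, filter_range_eq_cat M]
  simp
  omega
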